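-- pv_equiv track=rewrite | github.com/pypi-data/pypi-mirror-297 | packages/check-number-order/check_number_order-0.1.0.tar.gz/check_number_order-0.1.0/check_number_order/check_number_order.py | check_number_order
-- ===== SOURCE A (Python) =====
-- def check_number_order(number, increasing_string, decreasing_string):
--     num_str = str(number)
--
--     is_increasing = all(num_str[i] <= num_str[i + 1] for i in range(len(num_str) - 1))
--
--     is_decreasing = all(num_str[i] >= num_str[i + 1] for i in range(len(num_str) - 1))
--
--     if is_increasing or is_decreasing:
--         return increasing_string
--     else:
--         return decreasing_string
-- ===== SOURCE B (Python) =====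
-- def check_number_order(number, increasing_string, decreasing_string):
--     s = str(number)
--     if s == ''.join(sorted(s)) or s == ''.join(sorted(s, reverse=True)):
--         return increasing_string
--     return decreasing_string
-- ===== Notes on version B (the rewrite author's own statement) =====
-- stated objective: simpler
-- what changed: Replaces the two adjacent-pair index scans with a sort-then-compare test: the digit string is monotone iff it equals its sorted (resp. reverse-sorted) form.
import Mathlib
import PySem

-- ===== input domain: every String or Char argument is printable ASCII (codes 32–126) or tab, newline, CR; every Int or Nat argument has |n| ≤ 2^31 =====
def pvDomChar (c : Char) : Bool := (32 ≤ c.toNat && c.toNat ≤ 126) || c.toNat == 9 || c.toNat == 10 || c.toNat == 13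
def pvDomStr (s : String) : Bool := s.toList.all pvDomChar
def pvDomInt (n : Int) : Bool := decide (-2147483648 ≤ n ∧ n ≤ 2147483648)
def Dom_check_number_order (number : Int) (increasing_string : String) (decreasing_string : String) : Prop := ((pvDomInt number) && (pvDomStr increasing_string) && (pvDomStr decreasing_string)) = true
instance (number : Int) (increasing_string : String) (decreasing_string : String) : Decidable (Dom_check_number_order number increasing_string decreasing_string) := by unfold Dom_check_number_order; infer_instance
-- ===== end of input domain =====

-- B replaces the two adjacent-pair index scans with a sort-then-compare monotonicity test (simpler decomposition, not faster).


-- ===== PORT A =====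
def check_number_order (number : Int) (increasing_string : String) (decreasing_string : String) : String :=
  let num_str := PySem.Int.toChars number
  let is_increasing := (PySem.List.pyRange 0 ((num_str.length : Int) - 1) 1).all
    (fun i => PySem.List.pyGetD num_str i ' ' ≤ PySem.List.pyGetD num_str (i + 1) ' ')
  let is_decreasing := (PySem.List.pyRange 0 ((num_str.length : Int) - 1) 1).all
    (fun i => PySem.List.pyGetD num_str (i + 1) ' ' ≤ PySem.List.pyGetD num_str i ' ')
  if is_increasing || is_decreasing then increasing_string else decreasing_string

-- ===== PORT B =====
def check_number_order_alt (number : Int) (increasing_string : String) (decreasing_string : String) : String :=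
  let s := PySem.Int.toChars number
  if s = PySem.List.sorted s (fun x => x) false ∨ s = PySem.List.sorted s (fun x => x) true then
    increasing_string
  else
    decreasing_string

-- ===== PRECONDITION & SPEC =====
def Spec_check_number_order (number : Int) (increasing_string : String) (decreasing_string : String) (out : String) : Prop := out = check_number_order_alt number increasing_string decreasing_string
instance (number : Int) (increasing_string : String) (decreasing_string : String) (out : String) : Decidable (Spec_check_number_order number increasing_string decreasing_string out) := by unfold Spec_check_number_order; infer_instance

-- ===== CLAIM (what is proved, stated in full; the proofs are below) =====
def Claim_equal_check_number_order : Prop := ∀ (number : Int) (increasing_string : String) (decreasing_string : String), Dom_check_number_order number increasing_string decreasing_string → Spec_check_number_order number increasing_string decreasing_string (check_number_order number increasing_string decreasing_string)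

-- ===== LEMMAS AND PROOFS =====

-- The adjacent-pair scan of A is exactly "every consecutive pair satisfies f".
theorem adj_all_iff (l : List Char) (f : Char → Char → Bool) :
    ((PySem.List.pyRange 0 ((l.length : Int) - 1) 1).all
      (fun i => f (PySem.List.pyGetD l i ' ') (PySem.List.pyGetD l (i + 1) ' ')) = true)
    ↔ ∀ (i : Nat) (h : i + 1 < l.length), f l[i] l[i + 1] := by
  simp only [List.all_eq_true, PySem.List.mem_pyRange_one]
  constructor
  · intro h i hi
    have := h (i : Int) ⟨by omega, by omega⟩
    rw [PySem.List.pyGetD_eq_getElem l ' ' (by omega) (by omega),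
      PySem.List.pyGetD_eq_getElem l ' ' (by omega) (by omega)] at this
    have e1 : (i : Int).toNat = i := by omega
    have e2 : ((i : Int) + 1).toNat = i + 1 := by omega
    simp only [e1, e2] at this
    exact this
  · intro h i hi
    obtain ⟨h0, h1⟩ := hi
    rw [PySem.List.pyGetD_eq_getElem l ' ' h0 (by omega),
      PySem.List.pyGetD_eq_getElem l ' ' (by omega) (by omega)]
    have e : (i + 1).toNat = i.toNat + 1 := by omega
    simp only [e]
    exact h i.toNat (by omega)

theorem inc_iff (l : List Char) :
    ((PySem.List.pyRange 0 ((l.length : Int) - 1) 1).all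
      (fun i => PySem.List.pyGetD l i ' ' ≤ PySem.List.pyGetD l (i + 1) ' ') = true)
    ↔ l = PySem.List.sorted l (fun x => x) false := by
  rw [adj_all_iff l (fun a b => a ≤ b)]
  constructor
  · intro h
    have hp : l.Pairwise (fun a b : Char => a ≤ b) := by
      rw [← List.isChain_iff_pairwise, List.isChain_iff_getElem]
      intro i hi
      have := h i (by omega)
      simpa using this
    exact (PySem.List.sorted_eq_self_of_pairwise l (fun x => x) hp).symm
  · intro h
    have hp : l.Pairwise (fun a b : Char => a ≤ b) := by
      have := PySem.List.sorted_pairwise l (fun x : Char => x)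
      rwa [← h] at this
    intro i hi
    rw [← List.isChain_iff_pairwise, List.isChain_iff_getElem] at hp
    simpa using hp i (by omega)

theorem dec_iff (l : List Char) :
    ((PySem.List.pyRange 0 ((l.length : Int) - 1) 1).all
      (fun i => PySem.List.pyGetD l (i + 1) ' ' ≤ PySem.List.pyGetD l i ' ') = true)
    ↔ l = PySem.List.sorted l (fun x => x) true := by
  rw [adj_all_iff l (fun a b => b ≤ a)]
  constructor
  · intro h
    have hp : l.Pairwise (fun a b : Char => b ≤ a) := by
      rw [← List.isChain_iff_pairwise, List.isChain_iff_getElem]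
      intro i hi
      have := h i (by omega)
      simpa using this
    exact (PySem.List.sorted_rev_eq_self_of_pairwise l (fun x => x) hp).symm
  · intro h
    have hp : l.Pairwise (fun a b : Char => b ≤ a) := by
      have := PySem.List.sorted_pairwise_rev l (fun x : Char => x)
      rwa [← h] at this
    intro i hi
    rw [← List.isChain_iff_pairwise, List.isChain_iff_getElem] at hp
    simpa using hp i (by omega)

-- ===== VERDICT (by name: the statement is the Claim_ definition above) =====
theorem check_number_order_spec : Claim_equal_check_number_order := by
  intro number inc dec _
  unfold Spec_check_number_order check_number_order check_number_order_alt
  simp only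
  set l := PySem.Int.toChars number with hl
  by_cases h : l = PySem.List.sorted l (fun x => x) false ∨ l = PySem.List.sorted l (fun x => x) true
  · rw [if_pos h, if_pos]
    rcases h with h | h
    · simp [(inc_iff l).mpr h]
    · simp [(dec_iff l).mpr h]
  · rw [if_neg h, if_neg]
    push Not at h
    simp only [Bool.or_eq_true, not_or]
    exact ⟨fun hc => h.1 ((inc_iff l).mp hc), fun hc => h.2 ((dec_iff l).mp hc)⟩
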